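-- pv_equiv track=rewrite | github.com/sorennelson/bias-measurement | metric/gender_bias_metric.py | calculate_ssd_bias
-- ===== SOURCE A (Python) =====
-- def calculate_ssd_bias(data, male_words, female_words):
--     """Calculates the sum of squared differences
--     between male and female word counts in the data.
--
--     :param data: an iterable of iterables of strings, each string should be a single word
--     :param male_words: a list of strings containing all male words
--     :param female_words: a list of strings containing all female words
--     :return The bias metric and the per-template scores"""
--     # Get biases for each template's sentence completions
--     per_template_biases = []
--     for template in data:
--         fem_count, male_count = 0, 0
--         for completion in template:
--             if completion in male_words:
--                 male_count += 1
--             elif completion in female_words: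
--                 fem_count += 1
--         # Using square of difference in counts
--         template_bias = (male_count - fem_count) ** 2
--         per_template_biases.append(template_bias)
--
--     # Metric is sum of squared differences
--     total_bias_metric = sum(per_template_biases)
--
--     return total_bias_metric, per_template_biases
-- ===== SOURCE B (Python) =====
-- def calculate_ssd_bias(data, male_words, female_words):
--     """Counter/set re-implementation: tally each template once into a frequency
--     table, then sum counts over the deduped vocabularies (female set minus the
--     male set preserves A's if/elif male-priority)."""
--     male_set = set(male_words)
--     female_set = set(female_words) - male_set
--     per_template_biases = []
--     for template in data:
--         counts = {}
--         for w in template: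
--             counts[w] = counts.get(w, 0) + 1
--         male_count = sum(counts.get(w, 0) for w in male_set)
--         fem_count = sum(counts.get(w, 0) for w in female_set)
--         per_template_biases.append((male_count - fem_count) ** 2)
--     return sum(per_template_biases), per_template_biases
-- ===== Notes on version B (the rewrite author's own statement) =====
-- stated objective: faster
-- what changed: Instead of scanning each completion with list-membership tests against the word lists, B builds a per-template frequency table once and sums its counts over the deduped male set and the deduped female-minus-male set.
import Mathlib
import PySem

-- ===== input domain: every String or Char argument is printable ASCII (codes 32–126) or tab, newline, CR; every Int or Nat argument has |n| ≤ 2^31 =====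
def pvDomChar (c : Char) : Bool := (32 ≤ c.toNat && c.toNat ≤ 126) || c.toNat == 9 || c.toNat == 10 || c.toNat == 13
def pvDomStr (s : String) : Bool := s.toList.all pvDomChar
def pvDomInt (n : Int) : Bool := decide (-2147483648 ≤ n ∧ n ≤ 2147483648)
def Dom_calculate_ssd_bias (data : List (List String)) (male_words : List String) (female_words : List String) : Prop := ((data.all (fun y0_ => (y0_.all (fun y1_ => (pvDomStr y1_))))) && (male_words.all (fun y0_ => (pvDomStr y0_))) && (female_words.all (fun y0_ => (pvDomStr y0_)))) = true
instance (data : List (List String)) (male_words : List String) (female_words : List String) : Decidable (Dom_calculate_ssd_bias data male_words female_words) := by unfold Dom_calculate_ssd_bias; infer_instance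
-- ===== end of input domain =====

-- B replaces per-completion membership scans of the word lists by a per-template frequency
-- table summed over the deduped vocabularies, removing the inner list scans (measured faster).

-- ===== PORT A =====
def calculate_ssd_bias (data : List (List String)) (male_words : List String) (female_words : List String) : Int × List Int :=
  let per_template_biases : List Int :=
    data.foldl (fun per template =>
      let fm : Int × Int :=
        template.foldl (fun (s : Int × Int) completion =>
          if completion ∈ male_words then (s.1, s.2 + 1)
          else if completion ∈ female_words then (s.1 + 1, s.2)
          else s) (0, 0)
      per ++ [(fm.2 - fm.1) ^ 2]) []
  (per_template_biases.sum, per_template_biases)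

-- ===== PORT B =====
def calculate_ssd_bias_alt (data : List (List String)) (male_words : List String) (female_words : List String) : Int × List Int :=
  let male_set : PySem.Set String := PySem.Set.ofList male_words
  let female_set : PySem.Set String := PySem.Set.diff (PySem.Set.ofList female_words) male_set
  let per_template_biases : List Int :=
    data.foldl (fun per template =>
      let counts : PySem.Dict String Int :=
        template.foldl (fun d w => d.insert w (d.getD w 0 + 1)) PySem.Dict.empty
      let male_count : Int := (male_set.map (fun w => counts.getD w 0)).sum
      let fem_count : Int := (female_set.map (fun w => counts.getD w 0)).sum
      per ++ [(male_count - fem_count) ^ 2]) []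
  (per_template_biases.sum, per_template_biases)

-- ===== PRECONDITION & SPEC =====
def Spec_calculate_ssd_bias (data : List (List String)) (male_words : List String) (female_words : List String) (out : Int × List Int) : Prop := out = calculate_ssd_bias_alt data male_words female_words
instance (data : List (List String)) (male_words : List String) (female_words : List String) (out : Int × List Int) : Decidable (Spec_calculate_ssd_bias data male_words female_words out) := by unfold Spec_calculate_ssd_bias; infer_instance

-- ===== CLAIM (what is proved, stated in full; the proofs are below) =====
def Claim_equal_calculate_ssd_bias : Prop := ∀ (data : List (List String)) (male_words : List String) (female_words : List String), Dom_calculate_ssd_bias data male_words female_words → Spec_calculate_ssd_bias data male_words female_words (calculate_ssd_bias data male_words female_words)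

-- ===== LEMMAS AND PROOFS =====

-- A's inner loop: the two accumulators count female-not-male and male completions.
lemma loopA_counts (male_words female_words : List String) (t : List String) (a b : Int) :
    t.foldl (fun (s : Int × Int) completion =>
        if completion ∈ male_words then (s.1, s.2 + 1)
        else if completion ∈ female_words then (s.1 + 1, s.2)
        else s) (a, b)
    = (a + (t.countP (fun w => decide (w ∉ male_words ∧ w ∈ female_words)) : Int),
       b + (t.countP (fun w => decide (w ∈ male_words)) : Int)) := by
  induction t generalizing a b with
  | nil => simp
  | cons x t ih =>
    by_cases hm : x ∈ male_words <;> by_cases hf : x ∈ female_words <;>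
      simp [hm, hf, ih] <;> omega

-- a 0/1 indicator summed over a duplicate-free list
lemma sum_map_indicator (S : List String) (h : S.Nodup) (a : String) :
    (S.map (fun w => if w = a then (1 : Int) else 0)).sum = if a ∈ S then 1 else 0 := by
  induction S with
  | nil => simp
  | cons s S ih =>
    rcases List.nodup_cons.mp h with ⟨hs, hS⟩
    by_cases hsa : s = a
    · subst hsa; simp [hs, ih hS]
    · simp [hsa, ih hS, Ne.symm hsa]

-- summing per-word counts over a deduped vocabulary tallies the same completions as
-- a membership-test count over the template
lemma sum_count_eq_countP (S : List String) (t : List String) (p : String → Prop)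
    [DecidablePred p] (h : S.Nodup) (hm : ∀ w, w ∈ S ↔ p w) :
    (S.map (fun w => (t.count w : Int))).sum = (t.countP (fun w => decide (p w)) : Int) := by
  induction t with
  | nil => simp
  | cons a t ih =>
    have hcnt : ∀ w : String, ((a :: t).count w : Int)
        = (t.count w : Int) + (if w = a then (1 : Int) else 0) := by
      intro w
      by_cases hw : w = a
      · subst hw; simp
      · simp [hw, Ne.symm hw]
    calc (S.map (fun w => ((a :: t).count w : Int))).sum
        = (S.map (fun w => (t.count w : Int) + (if w = a then (1 : Int) else 0))).sum := by
          exact congrArg List.sum (List.map_congr_left (fun w _ => hcnt w))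
      _ = (S.map (fun w => (t.count w : Int))).sum
            + (S.map (fun w => if w = a then (1 : Int) else 0)).sum := by
          rw [← List.sum_map_add]
      _ = (t.countP (fun w => decide (p w)) : Int) + (if a ∈ S then 1 else 0) := by
          rw [ih, sum_map_indicator S h a]
      _ = ((a :: t).countP (fun w => decide (p w)) : Int) := by
          by_cases hp : p a
          · simp [hp, (hm a).mpr hp]
          · have haS : a ∉ S := fun hIn => hp ((hm a).mp hIn)
            simp [hp, haS]

-- the two per-template bias computations agree
lemma template_bias_eq (male_words female_words : List String) (t : List String) :
    ((t.foldl (fun (s : Int × Int) completion =>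
          if completion ∈ male_words then (s.1, s.2 + 1)
          else if completion ∈ female_words then (s.1 + 1, s.2)
          else s) (0, 0)).2
      - (t.foldl (fun (s : Int × Int) completion =>
          if completion ∈ male_words then (s.1, s.2 + 1)
          else if completion ∈ female_words then (s.1 + 1, s.2)
          else s) (0, 0)).1) ^ 2
    = (((PySem.Set.ofList male_words).map
          (fun w => (t.foldl (fun d w => d.insert w (d.getD w 0 + 1)) PySem.Dict.empty).getD w 0)).sum
       - (((PySem.Set.ofList female_words).diff (PySem.Set.ofList male_words)).map
          (fun w => (t.foldl (fun d w => d.insert w (d.getD w 0 + 1)) PySem.Dict.empty).getD w 0)).sum) ^ 2 := by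
  have hc : ∀ w : String,
      (t.foldl (fun d w => d.insert w (d.getD w 0 + 1)) PySem.Dict.empty).getD w 0
        = (t.count w : Int) := by
    intro w
    rw [PySem.Dict.getD_foldl_insert_add_one]
    simp [PySem.Dict.empty, PySem.Dict.getD, PySem.Dict.get?]
  have hmale : ((PySem.Set.ofList male_words).map
      (fun w => (t.foldl (fun d w => d.insert w (d.getD w 0 + 1)) PySem.Dict.empty).getD w 0)).sum
      = (t.countP (fun w => decide (w ∈ male_words)) : Int) := by
    rw [List.map_congr_left (fun w _ => hc w)]
    exact sum_count_eq_countP _ t _ (PySem.Set.nodup_ofList male_words)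
      (fun w => PySem.Set.mem_ofList male_words w)
  have hfem : (((PySem.Set.ofList female_words).diff (PySem.Set.ofList male_words)).map
      (fun w => (t.foldl (fun d w => d.insert w (d.getD w 0 + 1)) PySem.Dict.empty).getD w 0)).sum
      = (t.countP (fun w => decide (w ∉ male_words ∧ w ∈ female_words)) : Int) := by
    rw [List.map_congr_left (fun w _ => hc w)]
    refine sum_count_eq_countP _ t (fun w => w ∉ male_words ∧ w ∈ female_words)
      (PySem.Set.nodup_diff _ _ (PySem.Set.nodup_ofList female_words)) (fun w => ?_)
    rw [PySem.Set.mem_diff]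
    simp [PySem.Set.mem_ofList, and_comm]
  rw [loopA_counts, hmale, hfem]
  ring_nf

-- ===== VERDICT (by name: the statement is the Claim_ definition above) =====
theorem calculate_ssd_bias_spec : Claim_equal_calculate_ssd_bias := by
  intro data male_words female_words _
  unfold Spec_calculate_ssd_bias calculate_ssd_bias calculate_ssd_bias_alt
  simp only [PySem.List.foldl_append_singleton_eq_map, List.nil_append]
  rw [List.map_congr_left (fun t _ => template_bias_eq male_words female_words t)]
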